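-- pv_equiv track=rewrite | github.com/SVss/hierarchical-clustering | hierarchical_clustering.py | get_linkage_matrix
-- ===== SOURCE A (Python) =====
-- from itertools import combinations
--
-- def pairs(iterable):
--     return combinations(iterable, 2)
--
-- def get_linkage_matrix(distance_matrix):
--     def distance(cluster1, cluster2):
--         return min([distance_matrix[x][y] for x in cluster1 for y in cluster2])
--
--     current_cluster_index = len(distance_matrix)
--     result = []
--     forest = [(i, [i]) for i in range(current_cluster_index)]
--     while len(forest) > 1:
--         uniting_clusters, new_distance = min((((a, b), distance(a[1], b[1])) for a, b in pairs(forest)), key=lambda x: x[1])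
--         new_cluster_items = uniting_clusters[0][1] + uniting_clusters[1][1]
--         forest = [x for x in forest if x not in uniting_clusters]
--         forest.append((current_cluster_index, new_cluster_items))
--         current_cluster_index += 1
--         result.append([uniting_clusters[0][0], uniting_clusters[1][0], new_distance, len(new_cluster_items)])
--     return result
-- ===== SOURCE B (Python) =====
-- from itertools import combinations
--
--
-- def get_linkage_matrix(distance_matrix):
--     # Lance-Williams single-linkage: cache cluster-pair distances in a dict and
--     # update them incrementally on each merge instead of re-scanning members.
--     n = len(distance_matrix)
--     dist = {}
--     for i in range(n):
--         for j in range(n):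
--             if i != j:
--                 dist[(i, j)] = distance_matrix[i][j]
--     forest = [(i, 1) for i in range(n)]  # (cluster id, size)
--     result = []
--     next_id = n
--     while len(forest) > 1:
--         (a, b), d = min((((x, y), dist[(x[0], y[0])]) for x, y in combinations(forest, 2)),
--                         key=lambda t: t[1])
--         forest = [x for x in forest if x[0] != a[0] and x[0] != b[0]]
--         for c, _ in forest:
--             dist[(c, next_id)] = min(dist[(c, a[0])], dist[(c, b[0])])
--             dist[(next_id, c)] = min(dist[(a[0], c)], dist[(b[0], c)])
--         size = a[1] + b[1]
--         forest.append((next_id, size))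
--         result.append([a[0], b[0], d, size])
--         next_id += 1
--     return result
-- ===== Notes on version B (the rewrite author's own statement) =====
-- stated objective: faster
-- what changed: B replaces A's per-iteration rescan of every member pair of every cluster pair by a Lance-Williams single-linkage cache: a dict of cluster-pair distances initialised from the matrix once and updated with dist(new,c)=min(dist(a,c),dist(b,c)) at each merge, with the forest holding only (id,size) instead of member lists.
-- outside the precondition, e.g. on get_linkage_matrix([[0, 5], []]): A returns [[0, 1, 5, 2]], B raises IndexError
import Mathlib
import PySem

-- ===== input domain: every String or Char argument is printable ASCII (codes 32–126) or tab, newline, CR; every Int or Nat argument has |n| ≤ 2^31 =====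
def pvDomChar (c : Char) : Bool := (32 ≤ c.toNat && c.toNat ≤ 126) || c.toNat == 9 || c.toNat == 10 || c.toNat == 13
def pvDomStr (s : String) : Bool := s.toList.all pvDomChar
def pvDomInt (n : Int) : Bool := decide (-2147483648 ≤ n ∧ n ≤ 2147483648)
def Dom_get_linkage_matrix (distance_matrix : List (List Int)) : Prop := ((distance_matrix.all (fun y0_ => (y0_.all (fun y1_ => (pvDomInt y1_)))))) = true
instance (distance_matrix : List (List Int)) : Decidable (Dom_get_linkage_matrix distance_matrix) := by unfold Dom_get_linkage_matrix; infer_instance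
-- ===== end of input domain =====

-- B replaces A's per-merge rescan of all member pairs by a Lance-Williams single-linkage
-- distance cache updated incrementally at each merge (objective: faster).

-- ===== PORT A =====

-- distance_matrix[x][y]; exact under Pre_ (indices in range); Python raises IndexError otherwise
def pvGetM (M : List (List Int)) (x y : Int) : Int :=
  PySem.List.pyGetD (PySem.List.pyGetD M x []) y 0

-- pairs(xs) = itertools.combinations(xs, 2), in CPython's order, as pairs
def pvPairs {α : Type} : List α → List (α × α)
  | [] => []
  | x :: xs => (xs.map (fun y => (x, y))) ++ pvPairs xs

-- min(list of ints); exact on nonempty lists (Python raises ValueError on [])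
def pvMin (xs : List Int) : Int := PySem.List.minD xs (fun v => v) 0

-- distance(cluster1, cluster2) = min([M[x][y] for x in c1 for y in c2])
def pvDistA (M : List (List Int)) (c1 c2 : List Int) : Int :=
  pvMin (c1.flatMap (fun x => c2.map (fun y => pvGetM M x y)))

-- the while-loop; fuel = len(distance_matrix) suffices: every iteration shrinks the forest
def pvLoopA (M : List (List Int)) : Nat → List (Int × List Int) → Int → List (List Int) → List (List Int)
  | 0, _, _, res => res
  | fuel + 1, forest, cur, res =>
    if forest.length ≤ 1 then res
    else
      let cands := (pvPairs forest).map (fun p => (p, pvDistA M p.1.2 p.2.2))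
      let best := PySem.List.minD cands (fun t => t.2) (((0, []), (0, [])), 0)
      let a := best.1.1
      let b := best.1.2
      let items := a.2 ++ b.2
      pvLoopA M fuel ((forest.filter (fun x => decide (x ≠ a) && decide (x ≠ b))) ++ [(cur, items)])
        (cur + 1) (res ++ [[a.1, b.1, best.2, (items.length : Int)]])

def get_linkage_matrix (distance_matrix : List (List Int)) : List (List Int) :=
  pvLoopA distance_matrix distance_matrix.length
    ((PySem.List.pyRange 0 (distance_matrix.length : Int) 1).map (fun i => (i, [i])))
    (distance_matrix.length : Int) []

-- ===== PORT B =====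

-- dist[(i, j)] = distance_matrix[i][j] for all i != j in range(n)
def pvInitDist (M : List (List Int)) (n : Int) : PySem.Dict (Int × Int) Int :=
  (PySem.List.pyRange 0 n 1).foldl (fun d i =>
    (PySem.List.pyRange 0 n 1).foldl (fun d j =>
      if i ≠ j then d.insert (i, j) (pvGetM M i j) else d) d) PySem.Dict.empty

-- the while-loop of B: forest of (id, size), cached cluster-pair distances in dist
def pvLoopB : Nat → List (Int × Int) → PySem.Dict (Int × Int) Int → Int → List (List Int) → List (List Int)
  | 0, _, _, _, res => res
  | fuel + 1, forest, dist, nid, res =>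
    if forest.length ≤ 1 then res
    else
      let cands := (pvPairs forest).map (fun p => (p, dist.getD (p.1.1, p.2.1) 0))
      let best := PySem.List.minD cands (fun t => t.2) (((0, 0), (0, 0)), 0)
      let a := best.1.1
      let b := best.1.2
      let rest := forest.filter (fun x => decide (x.1 ≠ a.1) && decide (x.1 ≠ b.1))
      let dist' := rest.foldl (fun dd c =>
        (dd.insert (c.1, nid) (min (dd.getD (c.1, a.1) 0) (dd.getD (c.1, b.1) 0))).insert (nid, c.1)
          (min (dd.getD (a.1, c.1) 0) (dd.getD (b.1, c.1) 0))) dist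
      let size := a.2 + b.2
      pvLoopB fuel (rest ++ [(nid, size)]) dist' (nid + 1) (res ++ [[a.1, b.1, best.2, size]])

def get_linkage_matrix_alt (distance_matrix : List (List Int)) : List (List Int) :=
  pvLoopB distance_matrix.length
    ((PySem.List.pyRange 0 (distance_matrix.length : Int) 1).map (fun i => (i, 1)))
    (pvInitDist distance_matrix (distance_matrix.length : Int))
    (distance_matrix.length : Int) []

-- ===== PRECONDITION & SPEC =====
-- Pre_ requires every off-diagonal entry distance_matrix[i][j] (i ≠ j) to exist; A reads
-- entries lazily in a data-dependent merge order and can return on ragged matrices whose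
-- missing entries its merges never reach, while B reads the whole off-diagonal up front
-- and raises IndexError there.
def Pre_get_linkage_matrix (distance_matrix : List (List Int)) : Prop :=
  ∀ i ∈ List.range distance_matrix.length, ∀ j ∈ List.range distance_matrix.length,
    i ≠ j → j < (distance_matrix.getD i []).length
instance (distance_matrix : List (List Int)) : Decidable (Pre_get_linkage_matrix distance_matrix) := by
  unfold Pre_get_linkage_matrix; infer_instance

def pvWitness_get_linkage_matrix : List (List Int) := [[0, 2], [2, 0]]

def Spec_get_linkage_matrix (distance_matrix : List (List Int)) (out : List (List Int)) : Prop := out = get_linkage_matrix_alt distance_matrix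
instance (distance_matrix : List (List Int)) (out : List (List Int)) : Decidable (Spec_get_linkage_matrix distance_matrix out) := by unfold Spec_get_linkage_matrix; infer_instance

-- ===== CLAIM (what is proved, stated in full; the proofs are below) =====
def Claim_equal_get_linkage_matrix : Prop := ∀ (distance_matrix : List (List Int)), Dom_get_linkage_matrix distance_matrix → Pre_get_linkage_matrix distance_matrix → Spec_get_linkage_matrix distance_matrix (get_linkage_matrix distance_matrix)

-- ===== LEMMAS AND PROOFS =====

-- the abstraction from A's forest entries to B's: keep the id, replace members by their count
def pvAbs (p : Int × List Int) : Int × Int := (p.1, (p.2.length : Int))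

-- pvPairs commutes with map
theorem pvPairs_map {a b : Type} (g : a -> b) (l : List a) :
    pvPairs (l.map g) = (pvPairs l).map (fun p => (g p.1, g p.2)) := by
  induction l with
  | nil => rfl
  | cons x xs ih => simp [pvPairs, ih, List.map_map, Function.comp_def]

theorem pvPairs_mem {a : Type} {l : List a} {p : a × a} (h : p ∈ pvPairs l) :
    p.1 ∈ l ∧ p.2 ∈ l := by
  induction l with
  | nil => simp [pvPairs] at h
  | cons x xs ih =>
    simp only [pvPairs, List.mem_append, List.mem_map] at h
    rcases h with ⟨y, hy, hp⟩ | h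
    · subst hp; exact ⟨by simp, by simp [hy]⟩
    · rcases ih h with ⟨h1, h2⟩; exact ⟨by simp [h1], by simp [h2]⟩

theorem pvPairs_rel {a : Type} {R : a -> a -> Prop} {l : List a} (h : l.Pairwise R) :
    ∀ p ∈ pvPairs l, R p.1 p.2 := by
  induction l with
  | nil => intro p hp; simp [pvPairs] at hp
  | cons x xs ih =>
    intro p hp
    rcases List.pairwise_cons.mp h with ⟨hx, hxs⟩
    simp only [pvPairs, List.mem_append, List.mem_map] at hp
    rcases hp with ⟨y, hy, hp⟩ | hp
    · subst hp; exact hx y hy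
    · exact ih hxs p hp

theorem pvPairs_ne_nil {a : Type} {l : List a} (h : 2 ≤ l.length) : pvPairs l ≠ [] := by
  match l, h with
  | x :: y :: t, _ => simp [pvPairs]

-- min? through a key-preserving map
theorem pv_min?_map {a b : Type} (G : a -> b) (k1 : a -> Int) (k2 : b -> Int)
    (hk : ∀ x, k2 (G x) = k1 x) (l : List a) :
    PySem.List.min? (l.map G) k2 = Option.map G (PySem.List.min? l k1) := by
  simp only [PySem.List.min?, List.foldl_map]
  suffices hgen : ∀ (acc : Option a),
      l.foldl (fun acc x => match acc with
        | none => some (G x)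
        | some m => if k2 (G x) < k2 m then some (G x) else some m) (Option.map G acc)
      = Option.map G (l.foldl (fun acc x => match acc with
        | none => some x
        | some m => if k1 x < k1 m then some x else some m) acc) by
    simpa using hgen none
  have hstep : ∀ (acc : Option a) (x : a),
      (match Option.map G acc with
        | none => some (G x)
        | some m => if k2 (G x) < k2 m then some (G x) else some m)
      = Option.map G (match acc with
        | none => some x
        | some m => if k1 x < k1 m then some x else some m) := by
    intro acc x
    cases acc with
    | none => rfl
    | some m =>
      simp only [Option.map_some, hk]
      split_ifs <;> rfl
  induction l with
  | nil => intro acc; rfl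
  | cons x xs ih =>
    intro acc
    rw [List.foldl_cons, List.foldl_cons, hstep]
    exact ih _

-- min(list) facts, via PySem.List.min?: membership and minimality give a unique spec
theorem pvMin_mem {l : List Int} (h : l ≠ []) : pvMin l ∈ l := by
  obtain ⟨m, hm⟩ : ∃ m, PySem.List.min? l (fun v => v) = some m := by
    cases hc : PySem.List.min? l (fun v => v) with
    | none => exact absurd ((PySem.List.min?_eq_none_iff l _).mp hc) h
    | some m => exact ⟨m, rfl⟩
  rw [pvMin, PySem.List.minD, hm]
  exact PySem.List.min?_mem hm

theorem pvMin_le {l : List Int} (h : l ≠ []) {b : Int} (hb : b ∈ l) : pvMin l ≤ b := by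
  obtain ⟨m, hm⟩ : ∃ m, PySem.List.min? l (fun v => v) = some m := by
    cases hc : PySem.List.min? l (fun v => v) with
    | none => exact absurd ((PySem.List.min?_eq_none_iff l _).mp hc) h
    | some m => exact ⟨m, rfl⟩
  rw [pvMin, PySem.List.minD, hm]
  exact PySem.List.min?_isMin hm b hb

theorem pvMin_eq_of {l : List Int} (h : l ≠ []) {a : Int} (ha : a ∈ l)
    (hb : ∀ b ∈ l, a ≤ b) : pvMin l = a :=
  le_antisymm (pvMin_le h ha) (hb _ (pvMin_mem h))

theorem pv_flat_ne {c c2 : List Int} (g : Int -> Int -> Int) (hc : c ≠ []) (hc2 : c2 ≠ []) :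
    c.flatMap (fun x => c2.map (g x)) ≠ [] := by
  match c, hc with
  | x :: t, _ =>
    simp only [List.flatMap_cons, ne_eq, List.append_eq_nil_iff, not_and]
    intro hmap
    exact absurd (List.map_eq_nil_iff.mp hmap) hc2

theorem pv_mem_flat {c1 c2 : List Int} {g : Int -> Int -> Int} {b : Int} :
    b ∈ c1.flatMap (fun x => c2.map (g x)) ↔ ∃ x ∈ c1, ∃ y ∈ c2, g x y = b := by
  simp [List.mem_flatMap, List.mem_map]

theorem pvDistA_le (M : List (List Int)) {c1 c2 : List Int} (h1 : c1 ≠ []) (h2 : c2 ≠ [])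
    {x y : Int} (hx : x ∈ c1) (hy : y ∈ c2) : pvDistA M c1 c2 ≤ pvGetM M x y :=
  pvMin_le (pv_flat_ne _ h1 h2) (pv_mem_flat.mpr ⟨x, hx, y, hy, rfl⟩)

theorem pvDistA_mem (M : List (List Int)) {c1 c2 : List Int} (h1 : c1 ≠ []) (h2 : c2 ≠ []) :
    ∃ x ∈ c1, ∃ y ∈ c2, pvGetM M x y = pvDistA M c1 c2 :=
  pv_mem_flat.mp (pvMin_mem (pv_flat_ne _ h1 h2))

theorem pvDistA_append_right (M : List (List Int)) {c u v : List Int}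
    (hc : c ≠ []) (hu : u ≠ []) (hv : v ≠ []) :
    pvDistA M c (u ++ v) = min (pvDistA M c u) (pvDistA M c v) := by
  have huv : (u ++ v : List Int) ≠ [] := by simp [hu]
  apply pvMin_eq_of (pv_flat_ne _ hc huv)
  · rcases le_total (pvDistA M c u) (pvDistA M c v) with hle | hle
    · rw [min_eq_left hle]
      obtain ⟨x, hx, y, hy, he⟩ := pvDistA_mem M hc hu
      exact pv_mem_flat.mpr ⟨x, hx, y, by simp [hy], he⟩
    · rw [min_eq_right hle]
      obtain ⟨x, hx, y, hy, he⟩ := pvDistA_mem M hc hv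
      exact pv_mem_flat.mpr ⟨x, hx, y, by simp [hy], he⟩
  · intro b hb
    obtain ⟨x, hx, y, hy, he⟩ := pv_mem_flat.mp hb
    rcases List.mem_append.mp hy with hy | hy
    · exact le_trans (min_le_left _ _) (he ▸ pvDistA_le M hc hu hx hy)
    · exact le_trans (min_le_right _ _) (he ▸ pvDistA_le M hc hv hx hy)

theorem pvDistA_append_left (M : List (List Int)) {u v c : List Int}
    (hu : u ≠ []) (hv : v ≠ []) (hc : c ≠ []) :
    pvDistA M (u ++ v) c = min (pvDistA M u c) (pvDistA M v c) := by
  have huv : (u ++ v : List Int) ≠ [] := by simp [hu]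
  apply pvMin_eq_of (pv_flat_ne _ huv hc)
  · rcases le_total (pvDistA M u c) (pvDistA M v c) with hle | hle
    · rw [min_eq_left hle]
      obtain ⟨x, hx, y, hy, he⟩ := pvDistA_mem M hu hc
      exact pv_mem_flat.mpr ⟨x, by simp [hx], y, hy, he⟩
    · rw [min_eq_right hle]
      obtain ⟨x, hx, y, hy, he⟩ := pvDistA_mem M hv hc
      exact pv_mem_flat.mpr ⟨x, by simp [hx], y, hy, he⟩
  · intro b hb
    obtain ⟨x, hx, y, hy, he⟩ := pv_mem_flat.mp hb
    rcases List.mem_append.mp hx with hx | hx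
    · exact le_trans (min_le_left _ _) (he ▸ pvDistA_le M hu hc hx hy)
    · exact le_trans (min_le_right _ _) (he ▸ pvDistA_le M hv hc hx hy)

theorem pvDistA_single (M : List (List Int)) (i j : Int) :
    pvDistA M [i] [j] = pvGetM M i j := rfl

-- ids determine entries in an id-distinct forest
theorem pv_id_inj {b : Type} {l : List (Int × b)} (h : l.Pairwise (fun p q => p.1 ≠ q.1))
    {x y : Int × b} (hx : x ∈ l) (hy : y ∈ l) (he : x.1 = y.1) : x = y := by
  induction l with
  | nil => simp at hx
  | cons z zs ih =>
    rcases List.pairwise_cons.mp h with ⟨hz, hzs⟩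
    rcases List.mem_cons.mp hx with hx1 | hx2 <;> rcases List.mem_cons.mp hy with hy1 | hy2
    · rw [hx1, hy1]
    · exact absurd (hx1 ▸ he) (hz y hy2)
    · exact absurd (hy1 ▸ he).symm (hz x hx2)
    · exact ih hzs hx2 hy2

-- ===== the Lance-Williams update fold =====

def pvUpd (nid a1 b1 : Int) (dd : PySem.Dict (Int × Int) Int) (c1 : Int) :
    PySem.Dict (Int × Int) Int :=
  (dd.insert (c1, nid) (min (dd.getD (c1, a1) 0) (dd.getD (c1, b1) 0))).insert (nid, c1)
    (min (dd.getD (a1, c1) 0) (dd.getD (b1, c1) 0))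

theorem pvUpd_getD_ne {nid a1 b1 c1 x y : Int} (dd : PySem.Dict (Int × Int) Int)
    (h1 : ¬(x = c1 ∧ y = nid)) (h2 : ¬(x = nid ∧ y = c1)) :
    (pvUpd nid a1 b1 dd c1).getD (x, y) 0 = dd.getD (x, y) 0 := by
  unfold pvUpd
  rw [PySem.Dict.getD_insert, PySem.Dict.getD_insert]
  rw [if_neg (by simp [Prod.ext_iff]; omega), if_neg (by simp [Prod.ext_iff]; omega)]

theorem pvFold_pres {nid a1 b1 x y : Int} (l : List Int) (dd : PySem.Dict (Int × Int) Int)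
    (h : ∀ i ∈ l, ¬(x = i ∧ y = nid) ∧ ¬(x = nid ∧ y = i)) :
    (l.foldl (pvUpd nid a1 b1) dd).getD (x, y) 0 = dd.getD (x, y) 0 := by
  induction l generalizing dd with
  | nil => rfl
  | cons c t ih =>
    rw [List.foldl_cons, ih _ (fun i hi => h i (by simp [hi]))]
    exact pvUpd_getD_ne dd (h c (by simp)).1 (h c (by simp)).2

theorem pvFold_new {nid a1 b1 : Int} (l : List Int) (dd : PySem.Dict (Int × Int) Int)
    (hnd : l.Pairwise (· ≠ ·)) (hl : ∀ i ∈ l, i ≠ nid) (ha : a1 ≠ nid) (hb : b1 ≠ nid)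
    {i0 : Int} (hi : i0 ∈ l) :
    (l.foldl (pvUpd nid a1 b1) dd).getD (i0, nid) 0
      = min (dd.getD (i0, a1) 0) (dd.getD (i0, b1) 0) ∧
    (l.foldl (pvUpd nid a1 b1) dd).getD (nid, i0) 0
      = min (dd.getD (a1, i0) 0) (dd.getD (b1, i0) 0) := by
  induction l generalizing dd with
  | nil => simp at hi
  | cons c t ih =>
    rcases List.pairwise_cons.mp hnd with ⟨hc, ht⟩
    have hcn : c ≠ nid := hl c (by simp)
    rcases List.mem_cons.mp hi with rfl | hi0
    · -- head: the values are written now and preserved by the tail fold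
      rw [List.foldl_cons]
      constructor
      · rw [pvFold_pres t _ (fun i hit => ⟨fun hh => hc i hit hh.1, fun hh => hcn hh.1⟩)]
        unfold pvUpd
        rw [PySem.Dict.getD_insert, if_neg (by simp [Prod.ext_iff]; omega),
            PySem.Dict.getD_insert, if_pos rfl]
      · rw [pvFold_pres t _ (fun i hit => ⟨fun hh => hcn hh.2, fun hh => hc i hit hh.2⟩)]
        unfold pvUpd
        rw [PySem.Dict.getD_insert, if_pos rfl]
    · -- tail: the head step does not touch keys (i0, a1)… (all its keys involve nid or c)
      rw [List.foldl_cons]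
      have hi0c : i0 ≠ c := fun hh => (hc i0 hi0) hh.symm
      have h1 := ih (pvUpd nid a1 b1 dd c) ht (fun i hit => hl i (by simp [hit])) hi0
      have e1 : (pvUpd nid a1 b1 dd c).getD (i0, a1) 0 = dd.getD (i0, a1) 0 :=
        pvUpd_getD_ne dd (fun hh => ha hh.2) (fun hh => (hl i0 (by simp [hi0])) hh.1)
      have e2 : (pvUpd nid a1 b1 dd c).getD (i0, b1) 0 = dd.getD (i0, b1) 0 :=
        pvUpd_getD_ne dd (fun hh => hb hh.2) (fun hh => (hl i0 (by simp [hi0])) hh.1)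
      have e3 : (pvUpd nid a1 b1 dd c).getD (a1, i0) 0 = dd.getD (a1, i0) 0 :=
        pvUpd_getD_ne dd (fun hh => (hl i0 (by simp [hi0])) hh.2) (fun hh => ha hh.1)
      have e4 : (pvUpd nid a1 b1 dd c).getD (b1, i0) 0 = dd.getD (b1, i0) 0 :=
        pvUpd_getD_ne dd (fun hh => (hl i0 (by simp [hi0])) hh.2) (fun hh => hb hh.1)
      rw [e1, e2] at h1
      rw [e3, e4] at h1
      exact h1

-- ===== the initialisation fold =====

theorem pvInner_pres (M : List (List Int)) (i : Int) (js : List Int)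
    (d : PySem.Dict (Int × Int) Int) {x y : Int} (h : x ≠ i ∨ y ∉ js) :
    (js.foldl (fun d j => if i ≠ j then d.insert (i, j) (pvGetM M i j) else d) d).getD (x, y) 0
      = d.getD (x, y) 0 := by
  induction js generalizing d with
  | nil => rfl
  | cons j t ih =>
    have h' : x ≠ i ∨ y ∉ t := by
      rcases h with h | h
      · exact Or.inl h
      · exact Or.inr (fun ht => h (List.mem_cons_of_mem _ ht))
    rw [List.foldl_cons, ih _ h']
    by_cases hij : i ≠ j
    · rw [if_pos hij, PySem.Dict.getD_insert, if_neg ?_]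
      simp only [Prod.mk.injEq, not_and]
      intro hx hy
      rcases h with h | h
      · exact absurd hx h
      · exact absurd (hy ▸ List.mem_cons_self) h
    · rw [if_neg hij]

theorem pvInner_get (M : List (List Int)) {i j : Int} (js : List Int)
    (d : PySem.Dict (Int × Int) Int) (hnd : js.Pairwise (· ≠ ·)) (hj : j ∈ js) (hij : i ≠ j) :
    (js.foldl (fun d j => if i ≠ j then d.insert (i, j) (pvGetM M i j) else d) d).getD (i, j) 0
      = pvGetM M i j := by
  induction js generalizing d with
  | nil => simp at hj
  | cons j0 t ih =>
    rcases List.pairwise_cons.mp hnd with ⟨hj0, ht⟩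
    rw [List.foldl_cons]
    rcases List.mem_cons.mp hj with rfl | hjt
    · rw [pvInner_pres M i t _ (Or.inr (fun hh => (hj0 j hh) rfl)), if_pos hij,
          PySem.Dict.getD_insert, if_pos rfl]
    · exact ih _ ht hjt

theorem pvOuter_pres (M : List (List Int)) (n : Int) (is : List Int)
    (d : PySem.Dict (Int × Int) Int) {x y : Int} (h : x ∉ is) :
    (is.foldl (fun d i => (PySem.List.pyRange 0 n 1).foldl
        (fun d j => if i ≠ j then d.insert (i, j) (pvGetM M i j) else d) d) d).getD (x, y) 0
      = d.getD (x, y) 0 := by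
  induction is generalizing d with
  | nil => rfl
  | cons i t ih =>
    rw [List.foldl_cons, ih _ (fun ht => h (List.mem_cons_of_mem _ ht))]
    exact pvInner_pres M i _ d (Or.inl (fun hh => h (hh ▸ List.mem_cons_self)))

theorem pvOuter_get (M : List (List Int)) (n : Int) {i j : Int} (is : List Int)
    (d : PySem.Dict (Int × Int) Int) (hnd : is.Pairwise (· ≠ ·)) (hi : i ∈ is)
    (hj : j ∈ PySem.List.pyRange 0 n 1) (hij : i ≠ j) :
    (is.foldl (fun d i => (PySem.List.pyRange 0 n 1).foldl
        (fun d j => if i ≠ j then d.insert (i, j) (pvGetM M i j) else d) d) d).getD (i, j) 0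
      = pvGetM M i j := by
  induction is generalizing d with
  | nil => simp at hi
  | cons i0 t ih =>
    rcases List.pairwise_cons.mp hnd with ⟨hi0, ht⟩
    rw [List.foldl_cons]
    rcases List.mem_cons.mp hi with rfl | hit
    · rw [pvOuter_pres M n t _ (fun hh => (hi0 i hh) rfl)]
      exact pvInner_get M _ _ ((PySem.List.pairwise_lt_pyRange_one 0 n).imp ne_of_lt) hj hij
    · exact ih _ ht hit

theorem pvInit_getD (M : List (List Int)) (n : Int) {i j : Int}
    (hi : 0 ≤ i ∧ i < n) (hj : 0 ≤ j ∧ j < n) (hij : i ≠ j) :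
    (pvInitDist M n).getD (i, j) 0 = pvGetM M i j := by
  unfold pvInitDist
  exact pvOuter_get M n _ _ ((PySem.List.pairwise_lt_pyRange_one 0 n).imp ne_of_lt)
    ((PySem.List.mem_pyRange_one).mpr ⟨hi.1, hi.2⟩) ((PySem.List.mem_pyRange_one).mpr ⟨hj.1, hj.2⟩) hij

-- ===== main loop equivalence =====

-- the candidate-list abstraction: same pair of clusters (abstracted), same distance value
def pvG (c : ((Int × List Int) × (Int × List Int)) × Int) : ((Int × Int) × (Int × Int)) × Int :=
  ((pvAbs c.1.1, pvAbs c.1.2), c.2)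

theorem pvLoop_eq (M : List (List Int)) : ∀ (fuel : Nat) (FA : List (Int × List Int))
    (D : PySem.Dict (Int × Int) Int) (nid : Int) (res : List (List Int)),
    FA.Pairwise (fun p q => p.1 ≠ q.1) →
    (∀ p ∈ FA, p.1 < nid) →
    (∀ p ∈ FA, p.2 ≠ []) →
    (∀ p ∈ FA, ∀ q ∈ FA, p.1 ≠ q.1 → D.getD (p.1, q.1) 0 = pvDistA M p.2 q.2) →
    pvLoopA M fuel FA nid res = pvLoopB fuel (FA.map pvAbs) D nid res := by
  intro fuel
  induction fuel with
  | zero => intro FA D nid res _ _ _ _; rfl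
  | succ fuel ih =>
    intro FA D nid res hids hlt hne hD
    simp only [pvLoopA, pvLoopB, List.length_map]
    by_cases hguard : FA.length ≤ 1
    · rw [if_pos hguard, if_pos hguard]
    · rw [if_neg hguard, if_neg hguard]
      have h2 : 2 ≤ FA.length := by omega
      have hpne : pvPairs FA ≠ [] := pvPairs_ne_nil h2
      -- the two candidate lists are related by pvG
      have hcands : (pvPairs (FA.map pvAbs)).map (fun p => (p, D.getD (p.1.1, p.2.1) 0))
          = ((pvPairs FA).map (fun p => (p, pvDistA M p.1.2 p.2.2))).map pvG := by
        rw [pvPairs_map, List.map_map, List.map_map]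
        apply List.map_congr_left
        intro p hp
        rcases pvPairs_mem hp with ⟨hp1, hp2⟩
        have hne12 : p.1.1 ≠ p.2.1 := pvPairs_rel hids p hp
        simp only [Function.comp_def, pvG, pvAbs]
        rw [hD p.1 hp1 p.2 hp2 hne12]
      -- the selected best pair
      obtain ⟨bA, hbA⟩ : ∃ m, PySem.List.min? ((pvPairs FA).map
          (fun p => (p, pvDistA M p.1.2 p.2.2))) (fun t => t.2) = some m := by
        cases hc : PySem.List.min? ((pvPairs FA).map
            (fun p => (p, pvDistA M p.1.2 p.2.2))) (fun t => t.2) with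
        | none =>
          exact absurd (List.map_eq_nil_iff.mp ((PySem.List.min?_eq_none_iff _ _).mp hc)) hpne
        | some m => exact ⟨m, rfl⟩
      have hAD : PySem.List.minD ((pvPairs FA).map (fun p => (p, pvDistA M p.1.2 p.2.2)))
          (fun t => t.2) (((0, ([] : List Int)), (0, ([] : List Int))), 0) = bA := by
        rw [PySem.List.minD, hbA]; rfl
      have hBD : PySem.List.minD ((pvPairs (FA.map pvAbs)).map
            (fun p => (p, D.getD (p.1.1, p.2.1) 0)))
          (fun t => t.2) ((((0 : Int), (0 : Int)), ((0 : Int), (0 : Int))), 0) = pvG bA := by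
        rw [PySem.List.minD, hcands, pv_min?_map pvG (fun t => t.2) (fun t => t.2) (fun x => rfl), hbA]
        rfl
      rw [hAD, hBD]
      obtain ⟨pr, hpr, rfl⟩ : ∃ pr ∈ pvPairs FA, bA = (pr, pvDistA M pr.1.2 pr.2.2) := by
        have := PySem.List.min?_mem hbA
        rcases List.mem_map.mp this with ⟨pr, hpr, he⟩
        exact ⟨pr, hpr, he.symm⟩
      obtain ⟨a, b⟩ := pr
      have hma : a ∈ FA := (pvPairs_mem hpr).1
      have hmb : b ∈ FA := (pvPairs_mem hpr).2
      have hab : a.1 ≠ b.1 := pvPairs_rel hids _ hpr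
      have hane : a.2 ≠ [] := hne a hma
      have hbne : b.2 ≠ [] := hne b hmb
      -- reduce all pvG/pvAbs projections by definitional unfolding
      show pvLoopA M fuel
          ((FA.filter (fun x => decide (x ≠ a) && decide (x ≠ b))) ++ [(nid, a.2 ++ b.2)])
          (nid + 1) (res ++ [[a.1, b.1, pvDistA M a.2 b.2, ((a.2 ++ b.2).length : Int)]])
        = pvLoopB fuel
          (((FA.map pvAbs).filter (fun x => decide (x.1 ≠ a.1) && decide (x.1 ≠ b.1)))
            ++ [(nid, (a.2.length : Int) + (b.2.length : Int))])
          (((FA.map pvAbs).filter (fun x => decide (x.1 ≠ a.1) && decide (x.1 ≠ b.1))).foldl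
            (fun dd c => pvUpd nid a.1 b.1 dd c.1) D)
          (nid + 1) (res ++ [[a.1, b.1, pvDistA M a.2 b.2, (a.2.length : Int) + (b.2.length : Int)]])
      -- the filtered forests correspond
      have hrest : (FA.map pvAbs).filter
            (fun x => decide (x.1 ≠ a.1) && decide (x.1 ≠ b.1))
          = (FA.filter (fun x => decide (x ≠ a) && decide (x ≠ b))).map pvAbs := by
        rw [List.filter_map]
        congr 1
        apply List.filter_congr
        intro x hx
        simp only [Function.comp_def, pvAbs]
        have e1 : (x.1 ≠ a.1) = (x ≠ a) := by
          apply propext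
          constructor
          · exact fun h he => h (he ▸ rfl)
          · exact fun h he => h (pv_id_inj hids hx hma he)
        have e2 : (x.1 ≠ b.1) = (x ≠ b) := by
          apply propext
          constructor
          · exact fun h he => h (he ▸ rfl)
          · exact fun h he => h (pv_id_inj hids hx hmb he)
        simp only [e1, e2]
      rw [hrest]
      have hrow : ((a.2 ++ b.2).length : Int) = (a.2.length : Int) + (b.2.length : Int) := by
        simp
      rw [hrow]
      -- name the filtered A-forest and its facts
      set restA := FA.filter (fun x => decide (x ≠ a) && decide (x ≠ b)) with hrestA
      have hsubA : ∀ x ∈ restA, x ∈ FA ∧ x ≠ a ∧ x ≠ b := by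
        intro x hx
        have hf := List.mem_filter.mp hx
        have hxb := hf.2
        simp only [Bool.and_eq_true, decide_eq_true_eq] at hxb
        exact ⟨hf.1, hxb.1, hxb.2⟩
      have hidsR : restA.Pairwise (fun p q => p.1 ≠ q.1) := hids.filter _
      have hne_a1 : ∀ x ∈ restA, x.1 ≠ a.1 :=
        fun x hx he => (hsubA x hx).2.1 (pv_id_inj hids (hsubA x hx).1 hma he)
      have hne_b1 : ∀ x ∈ restA, x.1 ≠ b.1 :=
        fun x hx he => (hsubA x hx).2.2 (pv_id_inj hids (hsubA x hx).1 hmb he)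
      have hlt_r : ∀ x ∈ restA, x.1 < nid := fun x hx => hlt x (hsubA x hx).1
      -- the update fold as a fold over the surviving ids
      have hfold : (restA.map pvAbs).foldl (fun dd c => pvUpd nid a.1 b.1 dd c.1) D
          = (restA.map (fun c => c.1)).foldl (pvUpd nid a.1 b.1) D := by
        rw [List.foldl_map, List.foldl_map]
        rfl
      rw [hfold]
      have hforest : (restA.map pvAbs) ++ [(nid, (a.2.length : Int) + (b.2.length : Int))]
          = (restA ++ [(nid, a.2 ++ b.2)]).map pvAbs := by
        simp [pvAbs]
      rw [hforest]
      -- invariants for the recursive call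
      have hlids_nd : (restA.map (fun c => c.1)).Pairwise (· ≠ ·) := by
        rw [List.pairwise_map]; exact hidsR
      have hlids_nid : ∀ i ∈ restA.map (fun c => c.1), i ≠ nid := by
        intro i hi
        rcases List.mem_map.mp hi with ⟨c, hc, rfl⟩
        exact ne_of_lt (hlt_r c hc)
      have ha_nid : a.1 ≠ nid := ne_of_lt (hlt a hma)
      have hb_nid : b.1 ≠ nid := ne_of_lt (hlt b hmb)
      have hids' : (restA ++ [(nid, a.2 ++ b.2)]).Pairwise (fun p q => p.1 ≠ q.1) := by
        rw [List.pairwise_append]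
        refine ⟨hidsR, by simp, ?_⟩
        intro p hp q hq
        have : q = (nid, a.2 ++ b.2) := by simpa using hq
        rw [this]
        exact ne_of_lt (hlt_r p hp)
      have hlt' : ∀ p ∈ restA ++ [(nid, a.2 ++ b.2)], p.1 < nid + 1 := by
        intro p hp
        rcases List.mem_append.mp hp with hp | hp
        · exact lt_trans (hlt_r p hp) (by omega)
        · have : p = (nid, a.2 ++ b.2) := by simpa using hp
          rw [this]; omega
      have hne' : ∀ p ∈ restA ++ [(nid, a.2 ++ b.2)], p.2 ≠ [] := by
        intro p hp
        rcases List.mem_append.mp hp with hp | hp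
        · exact hne p (hsubA p hp).1
        · have : p = (nid, a.2 ++ b.2) := by simpa using hp
          rw [this]
          simp [hane]
      have hD' : ∀ p ∈ restA ++ [(nid, a.2 ++ b.2)], ∀ q ∈ restA ++ [(nid, a.2 ++ b.2)],
          p.1 ≠ q.1 →
          ((restA.map (fun c => c.1)).foldl (pvUpd nid a.1 b.1) D).getD (p.1, q.1) 0
            = pvDistA M p.2 q.2 := by
        intro p hp q hq hpq
        rcases List.mem_append.mp hp with hp | hp <;> rcases List.mem_append.mp hq with hq | hq
        · rw [pvFold_pres _ _ (fun i hi => ⟨fun hh => absurd hh.2 (ne_of_lt (hlt_r q hq)),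
            fun hh => absurd hh.1 (ne_of_lt (hlt_r p hp))⟩)]
          exact hD p (hsubA p hp).1 q (hsubA q hq).1 hpq
        · have hq' : q = (nid, a.2 ++ b.2) := by simpa using hq
          subst hq'
          have hres := (pvFold_new _ D hlids_nd hlids_nid ha_nid hb_nid
            (List.mem_map_of_mem hp : p.1 ∈ restA.map (fun c => c.1))).1
          rw [hres, hD p (hsubA p hp).1 a hma (hne_a1 p hp),
            hD p (hsubA p hp).1 b hmb (hne_b1 p hp)]
          exact (pvDistA_append_right M (hne p (hsubA p hp).1) hane hbne).symm
        · have hp' : p = (nid, a.2 ++ b.2) := by simpa using hp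
          subst hp'
          have hres := (pvFold_new _ D hlids_nd hlids_nid ha_nid hb_nid
            (List.mem_map_of_mem hq : q.1 ∈ restA.map (fun c => c.1))).2
          rw [hres, hD a hma q (hsubA q hq).1 (fun he => hne_a1 q hq he.symm),
            hD b hmb q (hsubA q hq).1 (fun he => hne_b1 q hq he.symm)]
          exact (pvDistA_append_left M hane hbne (hne q (hsubA q hq).1)).symm
        · have hp' : p = (nid, a.2 ++ b.2) := by simpa using hp
          have hq' : q = (nid, a.2 ++ b.2) := by simpa using hq
          rw [hp', hq'] at hpq
          exact absurd rfl hpq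
      exact ih _ _ _ _ hids' hlt' hne' hD'

theorem pv_main (M : List (List Int)) :
    get_linkage_matrix M = get_linkage_matrix_alt M := by
  unfold get_linkage_matrix get_linkage_matrix_alt
  have hmap : ((PySem.List.pyRange 0 (M.length : Int) 1).map
        (fun i => (i, ([i] : List Int)))).map pvAbs
      = (PySem.List.pyRange 0 (M.length : Int) 1).map (fun i => (i, (1 : Int))) := by
    simp [pvAbs, List.map_map, Function.comp_def]
  rw [← hmap]
  apply pvLoop_eq
  · rw [List.pairwise_map]
    exact (PySem.List.pairwise_lt_pyRange_one 0 _).imp ne_of_lt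
  · intro p hp
    rcases List.mem_map.mp hp with ⟨i, hi, rfl⟩
    exact (PySem.List.mem_pyRange_one.mp hi).2
  · intro p hp
    rcases List.mem_map.mp hp with ⟨i, hi, rfl⟩
    simp
  · intro p hp q hq hpq
    rcases List.mem_map.mp hp with ⟨i, hi, rfl⟩
    rcases List.mem_map.mp hq with ⟨j, hj, rfl⟩
    have hib := PySem.List.mem_pyRange_one.mp hi
    have hjb := PySem.List.mem_pyRange_one.mp hj
    show (pvInitDist M (M.length : Int)).getD (i, j) 0 = pvDistA M [i] [j]
    rw [pvInit_getD M _ ⟨hib.1, hib.2⟩ ⟨hjb.1, hjb.2⟩ hpq, pvDistA_single]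

-- ===== VERDICT (by name: the statement is the Claim_ definition above) =====
theorem get_linkage_matrix_spec : Claim_equal_get_linkage_matrix := by
  intro M _ _
  unfold Spec_get_linkage_matrix
  exact pv_main M
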